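-- pv_equiv track=rewrite | github.com/Samuelsen1/VS-Code-Port1 | ai-assistant/brain.py | _parse_teach
-- ===== SOURCE A (Python) =====
-- from typing import Dict, List, Optional, Tuple
--
-- def _parse_teach(text: str) -> Tuple[Optional[str], Optional[str]]:
--     """Parse 'teach: question -> answer' or 'learn: question -> answer'."""
--     text = text.strip()
--     for prefix in ["teach:", "learn:"]:
--         if text.lower().startswith(prefix):
--             rest = text[len(prefix):].strip()
--             if "->" in rest:
--                 q, _, a = rest.partition("->")
--                 q, a = q.strip(), a.strip()
--                 if q and a:
--                     return q, a
--     return None, None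
-- ===== SOURCE B (Python) =====
-- from typing import Optional, Tuple
--
-- def _parse_teach(text: str) -> Tuple[Optional[str], Optional[str]]:
--     """Split on the first ':' instead of testing each command prefix."""
--     head, sep, rest = text.strip().partition(":")
--     if sep and head.lower() in ("teach", "learn"):
--         q, arrow, a = rest.strip().partition("->")
--         if arrow:
--             q, a = q.strip(), a.strip()
--             if q and a:
--                 return q, a
--     return None, None
-- ===== Notes on version B (the rewrite author's own statement) =====
-- stated objective: idiomatic
-- what changed: Instead of looping over the two command prefixes with startswith and slicing, B partitions the stripped text at its first colon and tests whether the lowered head is one of the two command words.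
import Mathlib
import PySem

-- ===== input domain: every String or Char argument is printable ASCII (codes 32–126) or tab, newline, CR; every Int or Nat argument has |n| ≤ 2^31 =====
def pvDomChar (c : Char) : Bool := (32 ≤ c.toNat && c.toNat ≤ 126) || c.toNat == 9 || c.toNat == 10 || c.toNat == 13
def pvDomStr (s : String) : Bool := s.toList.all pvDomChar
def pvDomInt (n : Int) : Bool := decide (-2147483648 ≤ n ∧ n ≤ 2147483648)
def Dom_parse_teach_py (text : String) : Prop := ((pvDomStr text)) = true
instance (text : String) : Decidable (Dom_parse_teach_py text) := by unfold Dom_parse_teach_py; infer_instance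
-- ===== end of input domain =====

-- B replaces A's prefix loop (startswith each of "teach:"/"learn:", then slice) by a single
-- partition on the first ':' and a membership test of the lowered head; same return value.

-- ===== PORT A =====
-- the 'for prefix in ["teach:", "learn:"]' loop; str.partition("->") is ported by hand via
-- Chars.find (exact here: it is guarded by the '"->" in rest' check, so find ≥ 0)
def parse_teach_go (t : List Char) : List (List Char) → Option String × Option String
  | [] => (none, none)
  | p :: ps =>
    if PySem.Chars.startswith (PySem.Chars.lower t) p then
      let rest := PySem.Chars.strip (PySem.List.slice t (some (p.length : Int)) none)
      if PySem.Chars.isIn ['-', '>'] rest then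
        let i := (PySem.Chars.find rest ['-', '>']).toNat
        let q := PySem.Chars.strip (rest.take i)
        let a := PySem.Chars.strip (rest.drop (i + 2))
        if q ≠ [] ∧ a ≠ [] then (some (String.ofList q), some (String.ofList a))
        else parse_teach_go t ps
      else parse_teach_go t ps
    else parse_teach_go t ps

def parse_teach_py (text : String) : Option String × Option String :=
  parse_teach_go (PySem.Chars.strip text.toList)
    [['t','e','a','c','h',':'], ['l','e','a','r','n',':']]

-- ===== PORT B =====
-- str.partition(sep) is ported by hand via Chars.find: the separator part is empty iff find = -1
def parse_teach_py_alt (text : String) : Option String × Option String :=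
  let s := PySem.Chars.strip text.toList
  let j := PySem.Chars.find s [':']
  if j = -1 then (none, none)
  else
    let head := s.take j.toNat
    let rest := s.drop (j.toNat + 1)
    if PySem.Chars.lower head = ['t','e','a','c','h'] ∨
       PySem.Chars.lower head = ['l','e','a','r','n'] then
      let r := PySem.Chars.strip rest
      let k := PySem.Chars.find r ['-', '>']
      if k = -1 then (none, none)
      else
        let q := PySem.Chars.strip (r.take k.toNat)
        let a := PySem.Chars.strip (r.drop (k.toNat + 2))
        if q ≠ [] ∧ a ≠ [] then (some (String.ofList q), some (String.ofList a)) else (none, none)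
    else (none, none)

-- ===== PRECONDITION & SPEC =====
def Spec_parse_teach_py (text : String) (out : Option String × Option String) : Prop := out = parse_teach_py_alt text
instance (text : String) (out : Option String × Option String) : Decidable (Spec_parse_teach_py text out) := by unfold Spec_parse_teach_py; infer_instance

-- ===== CLAIM (what is proved, stated in full; the proofs are below) =====
def Claim_equal_parse_teach_py : Prop := ∀ (text : String), Dom_parse_teach_py text → Spec_parse_teach_py text (parse_teach_py text)

-- ===== LEMMAS AND PROOFS =====

theorem pv_prefix_single_drop (s : List Char) (c : Char) (i : Nat) :
    [c] <+: s.drop i ↔ ∃ h : i < s.length, s[i] = c := by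
  constructor
  · rintro ⟨t, ht⟩
    have hlen : i < s.length := by
      by_contra hge
      rw [List.drop_eq_nil_of_le (by omega)] at ht
      simp at ht
    refine ⟨hlen, ?_⟩
    rw [List.drop_eq_getElem_cons hlen] at ht
    exact (List.cons.injEq _ _ _ _ ▸ ht).1.symm
  · rintro ⟨h, hc⟩
    exact ⟨s.drop (i + 1), by rw [List.drop_eq_getElem_cons h, hc]; rfl⟩

theorem pv_find_single_spec (s : List Char) (c : Char)
    (h : PySem.Chars.find s [c] ≠ -1) :
    ∃ hlt : (PySem.Chars.find s [c]).toNat < s.length,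
      s[(PySem.Chars.find s [c]).toNat] = c ∧
      ∀ i, (hi : i < s.length) → i < (PySem.Chars.find s [c]).toNat → s[i] ≠ c := by
  have h0 := PySem.Chars.findFrom_zero s [c]
  have hspec := PySem.Chars.findFrom_natCast_spec s [c] 0 (Nat.zero_le _)
  rw [Nat.cast_zero, h0] at hspec
  obtain ⟨-, hpre, hmin⟩ := hspec h
  obtain ⟨hlt, hc⟩ := (pv_prefix_single_drop s c _).mp hpre
  refine ⟨hlt, hc, fun i hi hilt hic => ?_⟩
  exact hmin i (Nat.zero_le _) hilt ((pv_prefix_single_drop s c i).mpr ⟨hi, hic⟩)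

theorem pv_find_single_eq (s : List Char) (c : Char) (n : Nat) (hn : n < s.length)
    (hc : s[n] = c) (hmin : ∀ i, (hi : i < s.length) → i < n → s[i] ≠ c) :
    PySem.Chars.find s [c] = (n : Int) := by
  have hinf : [c] <:+: s :=
    ((pv_prefix_single_drop s c n).mpr ⟨hn, hc⟩).isInfix.trans (s.drop_suffix n).isInfix
  have hne : PySem.Chars.find s [c] ≠ -1 := (PySem.Chars.find_ne_neg_one_iff s [c]).mpr hinf
  have hpos : 0 ≤ PySem.Chars.find s [c] := (PySem.Chars.find_nonneg_iff s [c]).mpr hinf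
  obtain ⟨hlt, hceq, hm⟩ := pv_find_single_spec s c hne
  have : (PySem.Chars.find s [c]).toNat = n := by
    rcases Nat.lt_trichotomy (PySem.Chars.find s [c]).toNat n with h1 | h1 | h1
    · exact absurd hceq (hmin _ hlt h1)
    · exact h1
    · exact absurd hc (hm n hn h1)
  omega
theorem pv_lowerChar_colon (c : Char) (h : PySem.Chars.lowerChar c = ':') : c = ':' := by
  unfold PySem.Chars.lowerChar PySem.Chars.isupper at h
  split_ifs at h with hu
  · exfalso
    simp only [Bool.and_eq_true, decide_eq_true_eq, Char.le_def] at hu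
    obtain ⟨h1, h2⟩ := hu
    have b1 : 65 ≤ c.toNat := h1
    have b2 : c.toNat ≤ 90 := h2
    have hv : (c.toNat + 32).isValidChar := Or.inl (by omega)
    have h3 := congrArg Char.toNat h
    rw [show (Char.ofNat (c.toNat + 32)).toNat = c.toNat + 32 from by
      simp [Char.toNat_ofNat, hv]] at h3
    have : (':' : Char).toNat = 58 := by decide
    omega
  · exact h

theorem pv_sw_decomp (s p : List Char) (hp : p.length = 5) (hcol : (':' : Char) ∉ p)
    (h : PySem.Chars.startswith (PySem.Chars.lower s) (p ++ [':']) = true) :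
    PySem.Chars.find s [':'] = 5 ∧ PySem.Chars.lower (s.take 5) = p := by
  rw [PySem.Chars.startswith_iff] at h
  unfold PySem.Chars.lower at h ⊢
  have hlen6 : 6 ≤ s.length := by
    have := h.length_le
    simpa [hp] using this
  have hget : ∀ i, (hi : i < 6) → PySem.Chars.lowerChar (s[i]'(by omega)) = (p ++ [':'])[i]'(by simp [hp]; omega) := by
    intro i hi
    have := h.getElem (i := i) (by simp [hp]; omega)
    simpa using this.symm
  have h5 : s[5]'(by omega) = ':' := by
    apply pv_lowerChar_colon
    have := hget 5 (by omega)
    rw [List.getElem_append_right (by omega)] at this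
    simpa [hp] using this
  have hlow : ∀ i, (hi : i < 5) → PySem.Chars.lowerChar (s[i]'(by omega)) = p[i]'(by omega) := by
    intro i hi
    have := hget i (by omega)
    rwa [List.getElem_append_left (by omega)] at this
  have hne : ∀ i, (hi : i < s.length) → i < 5 → s[i] ≠ ':' := by
    intro i hi hilt hcon
    have h1 := hlow i (by omega)
    rw [hcon, show PySem.Chars.lowerChar ':' = ':' from by decide] at h1
    exact hcol (h1 ▸ List.getElem_mem _)
  constructor
  · exact pv_find_single_eq s ':' 5 (by omega) h5 hne
  · apply List.ext_getElem
    · simp [hp]; omega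
    · intro i h1 h2
      simp only [List.getElem_map, List.getElem_take]
      exact hlow i (by simp at h1; omega)

theorem pv_sw_conv (s p : List Char) (hp : p.length = 5)
    (hj : PySem.Chars.find s [':'] ≠ -1)
    (hh : PySem.Chars.lower (s.take (PySem.Chars.find s [':']).toNat) = p) :
    PySem.Chars.startswith (PySem.Chars.lower s) (p ++ [':']) = true := by
  obtain ⟨hlt, hc, -⟩ := pv_find_single_spec s ':' hj
  set n := (PySem.Chars.find s [':']).toNat with hn
  have hn5 : n = 5 := by
    have := congrArg List.length hh
    simp [PySem.Chars.lower, hp] at this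
    omega
  have ht5 : (PySem.Chars.find s [':']).toNat = 5 := hn ▸ hn5
  unfold PySem.Chars.lower at hh ⊢
  simp only [ht5] at hc
  simp only [hn5] at hh
  have hlt5 : 5 < s.length := by omega
  rw [PySem.Chars.startswith_iff]
  have htake : List.take 6 (s.map PySem.Chars.lowerChar) = p ++ [':'] := by
    rw [← List.map_take]
    have h6 : s.take 6 = s.take 5 ++ [s[5]'hlt5] := by
      rw [show (6 : Nat) = 5 + 1 from rfl, List.take_add_one]
      congr 1
      simp [List.getElem?_eq_getElem hlt5]
    rw [h6, List.map_append, hh]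
    simp [hc, show PySem.Chars.lowerChar ':' = ':' from by decide]
  rw [← htake]
  exact List.take_prefix _ _


-- the two sides agree for every character list s (s will be the stripped input)
theorem pv_main (s : List Char) :
    parse_teach_go s [['t','e','a','c','h',':'], ['l','e','a','r','n',':']] =
      (let j := PySem.Chars.find s [':']
       if j = -1 then ((none : Option String), (none : Option String))
       else
         let head := s.take j.toNat
         let rest := s.drop (j.toNat + 1)
         if PySem.Chars.lower head = ['t','e','a','c','h'] ∨
            PySem.Chars.lower head = ['l','e','a','r','n'] then
           let r := PySem.Chars.strip rest
           let k := PySem.Chars.find r ['-', '>']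
           if k = -1 then (none, none)
           else
             let q := PySem.Chars.strip (r.take k.toNat)
             let a := PySem.Chars.strip (r.drop (k.toNat + 2))
             if q ≠ [] ∧ a ≠ [] then (some (String.ofList q), some (String.ofList a)) else (none, none)
         else (none, none)) := by
  have harr : ∀ r : List Char, PySem.Chars.isIn ['-', '>'] r = (PySem.Chars.find r ['-', '>'] != -1) := fun r => rfl
  by_cases hT : PySem.Chars.startswith (PySem.Chars.lower s) (['t','e','a','c','h'] ++ [':']) = true
  · obtain ⟨hj, hhead⟩ := pv_sw_decomp s ['t','e','a','c','h'] (by decide) (by decide) hT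
    simp only [show (['t','e','a','c','h'] ++ [':'] : List Char) = ['t','e','a','c','h',':'] from rfl] at hT
    have hL' : PySem.Chars.startswith (PySem.Chars.lower s) ['l','e','a','r','n',':'] = false := by
      rw [Bool.eq_false_iff]
      intro h
      obtain ⟨-, hh2⟩ := pv_sw_decomp s ['l','e','a','r','n'] (by decide) (by decide) h
      rw [hhead] at hh2
      exact absurd hh2 (by decide)
    simp only [parse_teach_go, hT, hL', hj, harr, if_true, PySem.List.slice_from_natCast]
    simp [hhead]
  · by_cases hL : PySem.Chars.startswith (PySem.Chars.lower s) (['l','e','a','r','n'] ++ [':']) = true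
    · obtain ⟨hj, hhead⟩ := pv_sw_decomp s ['l','e','a','r','n'] (by decide) (by decide) hL
      have hT' : PySem.Chars.startswith (PySem.Chars.lower s) ['t','e','a','c','h',':'] = false := by
        rw [Bool.eq_false_iff]
        exact hT
      simp only [show (['l','e','a','r','n'] ++ [':'] : List Char) = ['l','e','a','r','n',':'] from rfl] at hL
      simp only [parse_teach_go, hT', hL, hj, harr, Bool.false_eq_true, if_false, PySem.List.slice_from_natCast]
      simp [hhead]
    · have hT' : PySem.Chars.startswith (PySem.Chars.lower s) ['t','e','a','c','h',':'] = false := by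
        rw [Bool.eq_false_iff]; exact hT
      have hL' : PySem.Chars.startswith (PySem.Chars.lower s) ['l','e','a','r','n',':'] = false := by
        rw [Bool.eq_false_iff]; exact hL
      simp only [parse_teach_go, hT', hL']
      by_cases hj : PySem.Chars.find s [':'] = -1
      · simp [hj]
      · have hhT : PySem.Chars.lower (s.take (PySem.Chars.find s [':']).toNat) ≠ ['t','e','a','c','h'] := by
          intro hh
          exact hT (pv_sw_conv s ['t','e','a','c','h'] (by decide) hj hh)
        have hhL : PySem.Chars.lower (s.take (PySem.Chars.find s [':']).toNat) ≠ ['l','e','a','r','n'] := by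
          intro hh
          exact hL (pv_sw_conv s ['l','e','a','r','n'] (by decide) hj hh)
        simp [hj, hhT, hhL]

-- ===== VERDICT (by name: the statement is the Claim_ definition above) =====
theorem parse_teach_py_spec : Claim_equal_parse_teach_py := by
  intro text _
  unfold Spec_parse_teach_py parse_teach_py parse_teach_py_alt
  exact pv_main (PySem.Chars.strip text.toList)
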